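-- pv_equiv track=rewrite | github.com/EESI/microbiome_embeddings | samples/r2v_functions.py | generate_kmers
-- ===== SOURCE A (Python) =====
-- def generate_kmers(line,k,alphabet={'A':'A','C':'C','G':'G','T':'T'}):
--
--     read = ''
--     l = line.strip('\n')
--     M = len(l) - k + 1
--     for n in range(M):
--         l = list(l)
--         nts = l[n:n+k]
--         kmer = ''
--         for nt in nts:
--             try:
--                 kmer += alphabet[nt]
--             except:
--                 continue
--         if len(kmer) == k:
--             yield kmer
-- ===== SOURCE B (Python) =====
-- def generate_kmers(line, k, alphabet={'A': 'A', 'C': 'C', 'G': 'G', 'T': 'T'}):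
--     l = line.strip('\n')
--     if k < 0:
--         return
--     mapped = [alphabet.get(c, '') for c in l]
--     pref = [0]
--     for m in mapped:
--         pref.append(pref[-1] + len(m))
--     for n in range(len(l) - k + 1):
--         if pref[n + k] - pref[n] == k:
--             yield ''.join(mapped[n:n + k])
-- ===== Notes on version B (the rewrite author's own statement) =====
-- stated objective: faster
-- what changed: B precomputes each character's alphabet substitution once and a prefix-sum array of substitution lengths, so each window's validity test is O(1) and the per-iteration list(l) rebuild and inner dict-lookup loop of A disappear.
import Mathlib
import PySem

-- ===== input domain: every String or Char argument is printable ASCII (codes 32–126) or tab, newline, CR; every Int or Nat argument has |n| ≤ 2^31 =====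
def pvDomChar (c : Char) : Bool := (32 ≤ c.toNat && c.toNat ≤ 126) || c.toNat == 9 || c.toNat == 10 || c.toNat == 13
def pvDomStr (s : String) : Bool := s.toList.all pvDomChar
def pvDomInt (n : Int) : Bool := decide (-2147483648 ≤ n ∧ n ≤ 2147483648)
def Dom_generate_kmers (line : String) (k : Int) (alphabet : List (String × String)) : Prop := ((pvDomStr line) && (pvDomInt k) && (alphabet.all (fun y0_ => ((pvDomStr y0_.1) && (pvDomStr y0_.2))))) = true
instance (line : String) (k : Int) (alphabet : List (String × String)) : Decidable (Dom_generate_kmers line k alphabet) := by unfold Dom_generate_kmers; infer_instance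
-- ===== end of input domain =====

-- B replaces A's per-window dict-lookup loop (and A's per-iteration list(l) rebuild) by a
-- one-pass substitution table plus prefix sums of substitution lengths (asymptotically faster).
-- Both ports model Python strings as List Char (PySem.Chars) and the generator as the list of
-- yielded values.

-- ===== PORT A =====
-- A's inner loop: kmer = ''; for nt in nts: try: kmer += alphabet[nt]; except: continue
-- (dict lookup = first match in the association list; Python dict keys are unique).
def pvAKmer (alphabet : List (String × String)) (nts : List Char) : List Char :=
  nts.foldl (fun km nt =>
    match (PySem.Dict.mk alphabet).get? (String.ofList [nt]) with
    | some v => km ++ v.toList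
    | none => km) []

-- Literal port of A.  'l = list(l)' rebuilds the same sequence of characters each iteration,
-- so the loop state is just the accumulator of yielded kmers; slicing is unchanged.
def generate_kmers (line : String) (k : Int) (alphabet : List (String × String)) : List String :=
  let l := (PySem.Str.stripChars line "\n").toList
  let M := (l.length : Int) - k + 1
  (PySem.List.pyRange 0 M 1).foldl (fun acc n =>
    let nts := PySem.List.slice l (some n) (some (n + k))
    let kmer := pvAKmer alphabet nts
    if (kmer.length : Int) = k then acc ++ [String.ofList kmer] else acc) []

-- ===== PORT B =====
-- mapped = [alphabet.get(c, '') for c in l]  (as lists of characters)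
def pvBMapped (alphabet : List (String × String)) (l : List Char) : List (List Char) :=
  l.map (fun c => (((PySem.Dict.mk alphabet).get? (String.ofList [c])).getD "").toList)

-- pref = [0]; for m in mapped: pref.append(pref[-1] + len(m))  (Python ints)
def pvBPref (mapped : List (List Char)) : List Int :=
  mapped.foldl (fun p m => p ++ [PySem.List.pyGetD p (-1) 0 + (m.length : Int)]) [0]

-- Literal port of B.  pref[n+k] / pref[n] are always in range (0 ≤ n, n+k ≤ len l), so
-- pyGetD with default 0 is exact here.
def generate_kmers_alt (line : String) (k : Int) (alphabet : List (String × String)) : List String :=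
  let l := (PySem.Str.stripChars line "\n").toList
  if k < 0 then [] else
  let mapped := pvBMapped alphabet l
  let pref := pvBPref mapped
  (PySem.List.pyRange 0 ((l.length : Int) - k + 1) 1).foldl (fun acc n =>
    if PySem.List.pyGetD pref (n + k) 0 - PySem.List.pyGetD pref n 0 = k
    then acc ++ [String.ofList (PySem.List.slice mapped (some n) (some (n + k))).flatten]
    else acc) []

-- ===== PRECONDITION & SPEC =====
def Spec_generate_kmers (line : String) (k : Int) (alphabet : List (String × String)) (out : List String) : Prop := out = generate_kmers_alt line k alphabet
instance (line : String) (k : Int) (alphabet : List (String × String)) (out : List String) : Decidable (Spec_generate_kmers line k alphabet out) := by unfold Spec_generate_kmers; infer_instance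

-- ===== CLAIM (what is proved, stated in full; the proofs are below) =====
def Claim_equal_generate_kmers : Prop := ∀ (line : String) (k : Int) (alphabet : List (String × String)), Dom_generate_kmers line k alphabet → Spec_generate_kmers line k alphabet (generate_kmers line k alphabet)

-- ===== LEMMAS AND PROOFS =====

-- the per-character substitution (empty if the character is not an alphabet key)
def pvG (alphabet : List (String × String)) (c : Char) : List Char :=
  (((PySem.Dict.mk alphabet).get? (String.ofList [c])).getD "").toList

theorem pvAKmer_aux (al : List (String × String)) (nts : List Char) (km : List Char) :
    nts.foldl (fun km nt =>
      match (PySem.Dict.mk al).get? (String.ofList [nt]) with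
      | some v => km ++ v.toList
      | none => km) km = km ++ (nts.map (pvG al)).flatten := by
  induction nts generalizing km with
  | nil => simp
  | cons c cs ih =>
    simp only [List.foldl_cons, List.map_cons, List.flatten_cons]
    cases h : (PySem.Dict.mk al).get? (String.ofList [c]) with
    | none => rw [ih]; simp [pvG, h]
    | some v => rw [ih]; simp [pvG, h, List.append_assoc]

theorem pvAKmer_eq (al : List (String × String)) (nts : List Char) :
    pvAKmer al nts = (nts.map (pvG al)).flatten := by
  simpa using pvAKmer_aux al nts []

-- pvBPref is [0] followed by the running sums
def pvSums (s : Int) : List (List Char) → List Int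
  | [] => []
  | m :: ms => (s + m.length) :: pvSums (s + m.length) ms

theorem pvBPref_aux (ms : List (List Char)) (p : List Int) (s : Int) :
    ms.foldl (fun p m => p ++ [PySem.List.pyGetD p (-1) 0 + (m.length : Int)]) (p ++ [s])
      = (p ++ [s]) ++ pvSums s ms := by
  induction ms generalizing p s with
  | nil => simp [pvSums]
  | cons m ms ih =>
    simp only [List.foldl_cons, pvSums]
    rw [PySem.List.pyGetD_neg_one_append_singleton, ih (p ++ [s]) (s + m.length)]
    simp [List.append_assoc]

theorem pvBPref_eq (ms : List (List Char)) : pvBPref ms = 0 :: pvSums 0 ms := by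
  have := pvBPref_aux ms [] 0
  simpa [pvBPref] using this

theorem pvSums_getD (ms : List (List Char)) (s : Int) (j : Nat) (hj : j < ms.length) :
    (pvSums s ms).getD j 0 = s + (((ms.take (j + 1)).map List.length).sum : Nat) := by
  induction ms generalizing s j with
  | nil => simp at hj
  | cons m ms ih =>
    cases j with
    | zero => simp [pvSums]
    | succ j =>
      simp only [pvSums, List.getD_cons_succ, List.take_succ_cons, List.map_cons, List.sum_cons]
      rw [ih (s + m.length) j (by simpa using Nat.lt_of_succ_lt_succ hj)]
      push_cast
      ring

theorem pvBPref_getD (ms : List (List Char)) (i : Nat) (hi : i ≤ ms.length) :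
    PySem.List.pyGetD (pvBPref ms) (i : Int) 0 = (((ms.take i).map List.length).sum : Nat) := by
  rw [pvBPref_eq, PySem.List.pyGetD_natCast]
  cases i with
  | zero => simp
  | succ j =>
    rw [List.getD_cons_succ, pvSums_getD ms 0 j (by omega)]
    simp

theorem foldl_const {α β : Type} (L : List α) (acc : β) :
    L.foldl (fun acc _ => acc) acc = acc := by
  induction L generalizing acc with
  | nil => rfl
  | cons x xs ih => simp only [List.foldl_cons]; exact ih acc

-- ===== VERDICT (by name: the statement is the Claim_ definition above) =====
theorem generate_kmers_spec : Claim_equal_generate_kmers := by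
  intro line k alphabet _
  unfold Spec_generate_kmers
  simp only [generate_kmers, generate_kmers_alt]
  by_cases hk : k < 0
  · rw [if_pos hk]
    rw [PySem.List.foldl_congr_mem (g := fun acc _ => acc)]
    · exact foldl_const _ _
    · intro acc n _
      rw [if_neg]
      intro h
      have h0 : (0 : Int) ≤ ((pvAKmer alphabet
        (PySem.List.slice (PySem.Str.stripChars line "\n").toList (some n) (some (n + k)))).length : Int) :=
        Int.natCast_nonneg _
      omega
  · rw [if_neg hk]
    rw [not_lt] at hk
    obtain ⟨kn, rfl⟩ := Int.eq_ofNat_of_zero_le hk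
    set l := (PySem.Str.stripChars line "\n").toList with hl
    apply PySem.List.foldl_congr_mem
    intro acc n hn
    rw [PySem.List.mem_pyRange_one] at hn
    obtain ⟨hn0, hnM⟩ := hn
    obtain ⟨nn, rfl⟩ := Int.eq_ofNat_of_zero_le hn0
    have hb : nn + kn ≤ l.length := by omega
    have hbn : nn ≤ l.length := by omega
    have hmlen : (pvBMapped alphabet l).length = l.length := by
      simp [pvBMapped]
    -- the two slices
    have hsliceA : PySem.List.slice l (some (nn : Int)) (some ((nn : Int) + (kn : Int)))
        = (l.drop nn).take kn := PySem.List.slice_natCast_add l nn kn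
    have hsliceB : PySem.List.slice (pvBMapped alphabet l) (some (nn : Int)) (some ((nn : Int) + (kn : Int)))
        = ((pvBMapped alphabet l).drop nn).take kn := PySem.List.slice_natCast_add _ nn kn
    -- A's kmer is the flatten of the mapped window
    have hmap : pvBMapped alphabet l = l.map (pvG alphabet) := rfl
    have hkmer : pvAKmer alphabet (PySem.List.slice l (some (nn : Int)) (some ((nn : Int) + (kn : Int))))
        = (((pvBMapped alphabet l).drop nn).take kn).flatten := by
      rw [hsliceA, pvAKmer_eq, hmap, List.map_take, List.map_drop]
    -- the prefix-sum difference is the length of the flatten of the window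
    have hcast : ((nn : Int) + (kn : Int)) = ((nn + kn : Nat) : Int) := by push_cast; ring
    have hp1 : PySem.List.pyGetD (pvBPref (pvBMapped alphabet l)) ((nn : Int) + (kn : Int)) 0
        = ((((pvBMapped alphabet l).take (nn + kn)).map List.length).sum : Nat) := by
      rw [hcast, pvBPref_getD _ _ (by omega)]
    have hp0 : PySem.List.pyGetD (pvBPref (pvBMapped alphabet l)) ((nn : Int)) 0
        = ((((pvBMapped alphabet l).take nn).map List.length).sum : Nat) := by
      rw [pvBPref_getD _ _ (by omega)]
    have hsplit : (((pvBMapped alphabet l).take (nn + kn)).map List.length).sum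
        = (((pvBMapped alphabet l).take nn).map List.length).sum
          + ((((pvBMapped alphabet l).drop nn).take kn).map List.length).sum := by
      rw [List.take_add, List.map_append, List.sum_append]
    have hflat : ((((pvBMapped alphabet l).drop nn).take kn).flatten).length
        = ((((pvBMapped alphabet l).drop nn).take kn).map List.length).sum := by
      simp [List.length_flatten]
    -- both conditions and both emitted values coincide
    rw [hkmer, hsliceB, hp1, hp0]
    exact if_congr (by rw [hflat, hsplit]; omega) rfl rfl
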